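-- pv_equiv track=rewrite | github.com/Best-rbrc/HackUPC | UI/match_users.py | match_users
-- ===== SOURCE A (Python) =====
-- def match_users(username, user_activities):
--     matches = {}
--     user_likes = user_activities.get(username, set())
--     for other_user, other_likes in user_activities.items():
--         if other_user != username:
--             common_activities = user_likes & other_likes
--             if common_activities:
--                 matches[other_user] = common_activities
--     return matches
-- ===== SOURCE B (Python) =====
-- def match_users(username, user_activities):
--     # Inverted index: activity -> set of users who like it.
--     index = {}
--     for user, likes in user_activities.items():
--         for a in likes:
--             index.setdefault(a, set()).add(user)
--     user_likes = user_activities.get(username, set())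
--     matched = {}
--     for a in user_likes:
--         for u in index.get(a, set()):
--             if u != username:
--                 matched.setdefault(u, set()).add(a)
--     return {u: matched[u] for u in user_activities if u in matched}
-- ===== Notes on version B (the rewrite author's own statement) =====
-- stated objective: alternative
-- what changed: B builds an inverted index from activities to the users who like them and accumulates each shared activity onto the matching user's list, instead of computing a set intersection per user; no speed claim.
import Mathlib
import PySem

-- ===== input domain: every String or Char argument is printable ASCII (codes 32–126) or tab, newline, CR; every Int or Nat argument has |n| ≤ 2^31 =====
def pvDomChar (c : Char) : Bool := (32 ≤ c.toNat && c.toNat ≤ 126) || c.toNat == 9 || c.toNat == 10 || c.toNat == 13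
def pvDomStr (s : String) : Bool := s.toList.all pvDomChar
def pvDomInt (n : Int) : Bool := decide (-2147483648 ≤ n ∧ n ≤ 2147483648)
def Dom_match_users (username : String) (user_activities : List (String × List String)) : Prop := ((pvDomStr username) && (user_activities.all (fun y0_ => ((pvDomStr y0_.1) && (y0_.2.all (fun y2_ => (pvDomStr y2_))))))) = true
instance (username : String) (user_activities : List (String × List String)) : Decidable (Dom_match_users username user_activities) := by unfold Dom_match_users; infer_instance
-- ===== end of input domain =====

-- B replaces the per-user set intersection with an inverted index (activity → users), accumulating
-- each shared activity on the matching user's posting list; same cost class, different decomposition.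

-- ===== PORT A =====
def match_users (username : String) (user_activities : List (String × List String)) : List (String × List String) :=
  let user_likes : PySem.Set String := (PySem.Dict.mk user_activities).getD username []
  (user_activities.foldl
    (fun (ms : PySem.Dict String (List String)) p =>
      if p.1 ≠ username then
        let common := PySem.Set.inter user_likes p.2
        if common ≠ [] then ms.insert p.1 common else ms
      else ms)
    PySem.Dict.empty).items

-- ===== PORT B =====
def match_users_alt (username : String) (user_activities : List (String × List String)) : List (String × List String) :=
  let index : PySem.Dict String (PySem.Set String) :=
    user_activities.foldl
      (fun ix p => p.2.foldl (fun ix a => ix.modify a [] (fun s => PySem.Set.add s p.1)) ix)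
      PySem.Dict.empty
  let user_likes : PySem.Set String := (PySem.Dict.mk user_activities).getD username []
  let matched : PySem.Dict String (PySem.Set String) :=
    user_likes.foldl
      (fun m a =>
        (index.getD a []).foldl
          (fun m u => if u ≠ username then m.modify u [] (fun s => PySem.Set.add s a) else m) m)
      PySem.Dict.empty
  (user_activities.foldl
    (fun (r : PySem.Dict String (List String)) p =>
      if matched.contains p.1 then r.insert p.1 (matched.getD p.1 []) else r)
    PySem.Dict.empty).items

-- ===== PRECONDITION & SPEC =====
-- Pre_ excludes association lists with duplicate keys or duplicate elements inside a value list: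
-- such inputs cannot arise from a Python dict of sets, so A's behaviour on them is an artefact of
-- the association-list representation.
def Pre_match_users (username : String) (user_activities : List (String × List String)) : Prop :=
  (user_activities.map Prod.fst).Nodup ∧ ∀ p ∈ user_activities, p.2.Nodup
instance (username : String) (user_activities : List (String × List String)) : Decidable (Pre_match_users username user_activities) := by unfold Pre_match_users; infer_instance
def pvWitness_match_users : String × (List (String × List String)) :=
  ("alice", [("alice", ["a", "b"]), ("bob", ["b", "c"]), ("carol", ["d"])])
def Spec_match_users (username : String) (user_activities : List (String × List String)) (out : List (String × List String)) : Prop := out = match_users_alt username user_activities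
instance (username : String) (user_activities : List (String × List String)) (out : List (String × List String)) : Decidable (Spec_match_users username user_activities out) := by unfold Spec_match_users; infer_instance

-- ===== CLAIM (what is proved, stated in full; the proofs are below) =====
def Claim_equal_match_users : Prop := ∀ (username : String) (user_activities : List (String × List String)), Dom_match_users username user_activities → Pre_match_users username user_activities → Spec_match_users username user_activities (match_users username user_activities)

-- ===== LEMMAS AND PROOFS =====

-- proof-only helpers naming the intermediate dictionaries of port B
def pvIndex (user_activities : List (String × List String)) : PySem.Dict String (PySem.Set String) :=
  user_activities.foldl
    (fun ix p => p.2.foldl (fun ix a => ix.modify a [] (fun s => PySem.Set.add s p.1)) ix)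
    PySem.Dict.empty

def pvMatched (username : String) (user_activities : List (String × List String)) : PySem.Dict String (PySem.Set String) :=
  ((PySem.Dict.mk user_activities).getD username ([] : List String)).foldl
    (fun m a =>
      ((pvIndex user_activities).getD a []).foldl
        (fun m u => if u ≠ username then m.modify u [] (fun s => PySem.Set.add s a) else m) m)
    PySem.Dict.empty

lemma pv_alt_eq (username : String) (ua : List (String × List String)) :
    match_users_alt username ua =
      (ua.foldl
        (fun (r : PySem.Dict String (List String)) p =>
          if (pvMatched username ua).contains p.1 then r.insert p.1 ((pvMatched username ua).getD p.1 []) else r)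
        PySem.Dict.empty).items := rfl

-- pvIndex membership: x appears on activity a's posting list iff some user x in ua likes a
lemma pv_index_inner_mem (u : String) (L : List String) (ix : PySem.Dict String (PySem.Set String)) (a x : String) :
    x ∈ (L.foldl (fun ix b => ix.modify b [] (fun s => PySem.Set.add s u)) ix).getD a [] ↔
      x ∈ ix.getD a [] ∨ (a ∈ L ∧ x = u) := by
  induction L generalizing ix with
  | nil => simp
  | cons b L ih =>
    simp only [List.foldl_cons, ih, PySem.Dict.getD_modify, List.mem_cons]
    by_cases hab : a = b
    · subst hab; simp [PySem.Set.mem_add]; tauto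
    · simp only [hab, if_false]
      tauto

lemma pv_index_mem (ua : List (String × List String)) (a x : String) :
    x ∈ (pvIndex ua).getD a [] ↔ ∃ p ∈ ua, p.1 = x ∧ a ∈ p.2 := by
  unfold pvIndex
  suffices h : ∀ (ix : PySem.Dict String (PySem.Set String)),
      x ∈ (ua.foldl (fun ix p => p.2.foldl (fun ix b => ix.modify b [] (fun s => PySem.Set.add s p.1)) ix) ix).getD a [] ↔
        x ∈ ix.getD a [] ∨ ∃ p ∈ ua, p.1 = x ∧ a ∈ p.2 by
    simpa using h PySem.Dict.empty
  induction ua with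
  | nil => simp
  | cons p ua ih =>
    intro ix
    simp only [List.foldl_cons, ih, pv_index_inner_mem, List.mem_cons]
    constructor
    · rintro ((h | ⟨ha, hx⟩) | ⟨q, hq, h1, h2⟩)
      · exact Or.inl h
      · exact Or.inr ⟨p, Or.inl rfl, hx.symm, ha⟩
      · exact Or.inr ⟨q, Or.inr hq, h1, h2⟩
    · rintro (h | ⟨q, hq | hq, h1, h2⟩)
      · exact Or.inl (Or.inl h)
      · subst hq; exact Or.inl (Or.inr ⟨h2, h1.symm⟩)
      · exact Or.inr ⟨q, hq, h1, h2⟩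

-- pvMatched inner loop: effect on one user's accumulated set
lemma pv_matched_inner_getD (username a : String) (us : List String)
    (m : PySem.Dict String (PySem.Set String)) (x : String) :
    (us.foldl (fun m u => if u ≠ username then m.modify u [] (fun s => PySem.Set.add s a) else m) m).getD x [] =
      if x ∈ us ∧ x ≠ username then PySem.Set.add (m.getD x []) a else m.getD x [] := by
  induction us generalizing m with
  | nil => simp
  | cons u us ih =>
    simp only [List.foldl_cons, ih, List.mem_cons]
    by_cases hu : u = username
    · subst hu; by_cases hx : x = u <;> simp [hx]
    · simp only [if_pos (show u ≠ username from hu), PySem.Dict.getD_modify]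
      by_cases hxu : x = u
      · subst hxu
        have hxname : x ≠ username := hu
        by_cases hmem : x ∈ us <;>
          simp [hmem, hxname, PySem.Set.add_of_mem, PySem.Set.mem_add]
      · simp [hxu]

lemma pv_matched_inner_contains (username a : String) (us : List String)
    (m : PySem.Dict String (PySem.Set String)) (x : String) :
    (us.foldl (fun m u => if u ≠ username then m.modify u [] (fun s => PySem.Set.add s a) else m) m).contains x =
      (decide (x ∈ us ∧ x ≠ username) || m.contains x) := by
  induction us generalizing m with
  | nil => simp
  | cons u us ih =>
    simp only [List.foldl_cons, ih, List.mem_cons]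
    by_cases hu : u = username
    · subst hu; by_cases hx : x = u <;> simp [hx]
    · simp only [if_pos (show u ≠ username from hu), PySem.Dict.contains_modify]
      by_cases hxu : x = u
      · subst hxu; simp [hu]
      · have hb : (x == u) = false := beq_eq_false_iff_ne.mpr hxu
        rw [hb]
        simp [hxu]

-- pvMatched outer loop, value lists
lemma pv_matched_outer_getD (username : String) (ix : PySem.Dict String (PySem.Set String))
    (l : List String) (m : PySem.Dict String (PySem.Set String)) (x : String)
    (hx : x ≠ username) (hl : l.Nodup) (hdisj : ∀ a ∈ l, a ∉ m.getD x []) :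
    (l.foldl (fun m a =>
        ((ix.getD a []).foldl
          (fun m u => if u ≠ username then m.modify u [] (fun s => PySem.Set.add s a) else m) m)) m).getD x [] =
      m.getD x [] ++ l.filter (fun a => (ix.getD a []).contains x) := by
  induction l generalizing m with
  | nil => simp
  | cons a l ih =>
    simp only [List.foldl_cons, List.filter_cons]
    have hstep := pv_matched_inner_getD username a (ix.getD a []) m x
    by_cases hmem : x ∈ ix.getD a []
    · have hcond : x ∈ ix.getD a [] ∧ x ≠ username := ⟨hmem, hx⟩
      have hc : (ix.getD a []).contains x = true := by
        simpa [PySem.Set.contains_iff] using hmem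
      have hadd : PySem.Set.add (m.getD x []) a = m.getD x [] ++ [a] :=
        PySem.Set.add_of_not_mem (hdisj a (by simp))
      have hdisj' : ∀ b ∈ l,
          b ∉ ((ix.getD a []).foldl
            (fun m u => if u ≠ username then m.modify u [] (fun s => PySem.Set.add s a) else m) m).getD x [] := by
        intro b hb
        rw [hstep, if_pos hcond, hadd]
        simp only [List.mem_append, List.mem_singleton]
        rintro (h | h)
        · exact hdisj b (by simp [hb]) h
        · subst h; exact (List.nodup_cons.mp hl).1 hb
      rw [ih _ hl.of_cons hdisj', hstep, if_pos hcond, hadd, hc]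
      simp
    · have hcond : ¬ (x ∈ ix.getD a [] ∧ x ≠ username) := by tauto
      have hc : (ix.getD a []).contains x = false := by
        simp [hmem]
      have hdisj' : ∀ b ∈ l,
          b ∉ ((ix.getD a []).foldl
            (fun m u => if u ≠ username then m.modify u [] (fun s => PySem.Set.add s a) else m) m).getD x [] := by
        intro b hb
        rw [hstep, if_neg hcond]
        exact hdisj b (by simp [hb])
      rw [ih _ hl.of_cons hdisj', hstep, if_neg hcond, hc]
      simp

-- pvMatched outer loop, key membership
lemma pv_matched_outer_contains (username : String) (ix : PySem.Dict String (PySem.Set String))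
    (l : List String) (m : PySem.Dict String (PySem.Set String)) (x : String) :
    (l.foldl (fun m a =>
        ((ix.getD a []).foldl
          (fun m u => if u ≠ username then m.modify u [] (fun s => PySem.Set.add s a) else m) m)) m).contains x =
      (m.contains x || l.any (fun a => decide (x ∈ ix.getD a [] ∧ x ≠ username))) := by
  induction l generalizing m with
  | nil => simp
  | cons a l ih =>
    simp only [List.foldl_cons, ih, pv_matched_inner_contains, List.any_cons]
    cases m.contains x <;> cases h : decide (x ∈ ix.getD a [] ∧ x ≠ username) <;> simp_all
    
-- with unique keys, membership of a's posting list at p.1 is just a ∈ p.2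
lemma pv_posting_iff (ua : List (String × List String)) (hkeys : (ua.map Prod.fst).Nodup)
    (p : String × List String) (hp : p ∈ ua) (a : String) :
    p.1 ∈ (pvIndex ua).getD a [] ↔ a ∈ p.2 := by
  rw [pv_index_mem]
  constructor
  · rintro ⟨q, hq, h1, h2⟩
    have : q = p := List.inj_on_of_nodup_map hkeys hq hp h1
    subst this; exact h2
  · intro h; exact ⟨p, hp, rfl, h⟩

lemma pv_user_likes_nodup (username : String) (ua : List (String × List String))
    (hvals : ∀ p ∈ ua, p.2.Nodup) :
    ((PySem.Dict.mk ua).getD username ([] : List String)).Nodup := by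
  simp only [PySem.Dict.getD, PySem.Dict.get?]
  cases hfind : (PySem.Dict.mk ua).items.find? (fun p => p.1 == username) with
  | none => simp
  | some q =>
    simp only [Option.map_some, Option.getD_some]
    exact hvals q (List.mem_of_find?_eq_some hfind)

-- ===== VERDICT (by name: the statement is the Claim_ definition above) =====
theorem match_users_spec : Claim_equal_match_users := by
  intro username ua _ hpre
  obtain ⟨hkeys, hvals⟩ := hpre
  unfold Spec_match_users
  rw [pv_alt_eq]
  simp only [match_users]
  set ul : PySem.Set String := (PySem.Dict.mk ua).getD username [] with hul
  have hulnd : ul.Nodup := pv_user_likes_nodup username ua hvals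
  -- characterize matched at any key x via the lemmas
  have hM : pvMatched username ua =
      ul.foldl (fun m a =>
        (((pvIndex ua).getD a []).foldl
          (fun m u => if u ≠ username then m.modify u [] (fun s => PySem.Set.add s a) else m) m))
        PySem.Dict.empty := rfl
  have hMc : ∀ x, (pvMatched username ua).contains x =
      ul.any (fun a => decide (x ∈ (pvIndex ua).getD a [] ∧ x ≠ username)) := by
    intro x
    rw [hM, pv_matched_outer_contains]
    simp
  have hMg : ∀ x, x ≠ username → (pvMatched username ua).getD x [] =
      ul.filter (fun a => ((pvIndex ua).getD a []).contains x) := by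
    intro x hx
    rw [hM, pv_matched_outer_getD username _ _ _ _ hx hulnd (by simp)]
    simp
  congr 1
  apply PySem.List.foldl_congr_mem'
  intro p hp m
  by_cases hpu : p.1 = username
  · have hc : (pvMatched username ua).contains p.1 = false := by
      rw [hMc]
      simp [hpu]
    rw [hpu] at hc
    simp [hpu, hc]
  · -- the filter over posting lists IS the set intersection
    have hfilter : ul.filter (fun a => ((pvIndex ua).getD a []).contains p.1) =
        PySem.Set.inter ul p.2 := by
      unfold PySem.Set.inter
      apply List.filter_congr
      intro a _
      rw [Bool.eq_iff_iff]
      simp only [PySem.Set.contains_iff]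
      exact pv_posting_iff ua hkeys p hp a
    have hcont : (pvMatched username ua).contains p.1 =
        decide (PySem.Set.inter ul p.2 ≠ []) := by
      rw [hMc, Bool.eq_iff_iff, decide_eq_true_iff, List.any_eq_true]
      rw [← hfilter]
      constructor
      · rintro ⟨a, ha, h⟩
        simp only [decide_eq_true_iff] at h
        intro hnil
        have hmm : a ∈ List.filter (fun a => ((pvIndex ua).getD a []).contains p.1) ul :=
          List.mem_filter.mpr ⟨ha, by simpa [PySem.Set.contains_iff] using h.1⟩
        rw [hnil] at hmm
        simp at hmm
      · intro hne
        obtain ⟨a, ha⟩ := List.exists_mem_of_ne_nil _ hne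
        rw [List.mem_filter] at ha
        refine ⟨a, ha.1, ?_⟩
        simp only [decide_eq_true_iff]
        exact ⟨by simpa [PySem.Set.contains_iff] using ha.2, hpu⟩
    rw [hcont]
    by_cases hne : PySem.Set.inter ul p.2 ≠ []
    · simp only [if_pos (show p.1 ≠ username from hpu)]
      rw [hMg p.1 hpu, hfilter]
      simp [hne]
    · simp [hne, hpu]
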